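-- pv_equiv track=rewrite | github.com/abilian/prescrypt | scripts/coverage_report.py | group_lines_with_gap
-- ===== SOURCE A (Python) =====
-- def group_lines_with_gap(lines: list[int], gap: int = 5) -> list[tuple[int, int]]:
--     """Group line numbers that are close together (within gap lines)."""
--     if not lines:
--         return []
--
--     lines = sorted(lines)
--     groups = []
--     start = lines[0]
--     end = lines[0]
--
--     for line in lines[1:]:
--         if line <= end + gap:
--             end = line
--         else:
--             groups.append((start, end))
--             start = line
--             end = line
--
--     groups.append((start, end))
--     return groups
-- ===== SOURCE B (Python) =====
-- def _span(prev, xs, gap):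
--     """Longest prefix of xs that chains onto prev (each step within gap); returns (prefix, rest)."""
--     for i, x in enumerate(xs):
--         if x > prev + gap:
--             return xs[:i], xs[i:]
--         prev = x
--     return xs, []
--
--
-- def group_lines_with_gap(lines: list[int], gap: int = 5) -> list[tuple[int, int]]:
--     """Group line numbers that are close together (within gap lines)."""
--     s = sorted(lines)
--     out = []
--     while s:
--         head = s[0]
--         grp, s = _span(head, s[1:], gap)
--         out.append((head, grp[-1] if grp else head))
--     return out
-- ===== Notes on version B (the rewrite author's own statement) =====
-- stated objective: alternative
-- what changed: Instead of a single fold carrying (groups, start, end) state, B sorts and then repeatedly splits off the longest chainable prefix (a span/takewhile step) and emits (head, last-of-chunk) per chunk.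
import Mathlib
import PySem

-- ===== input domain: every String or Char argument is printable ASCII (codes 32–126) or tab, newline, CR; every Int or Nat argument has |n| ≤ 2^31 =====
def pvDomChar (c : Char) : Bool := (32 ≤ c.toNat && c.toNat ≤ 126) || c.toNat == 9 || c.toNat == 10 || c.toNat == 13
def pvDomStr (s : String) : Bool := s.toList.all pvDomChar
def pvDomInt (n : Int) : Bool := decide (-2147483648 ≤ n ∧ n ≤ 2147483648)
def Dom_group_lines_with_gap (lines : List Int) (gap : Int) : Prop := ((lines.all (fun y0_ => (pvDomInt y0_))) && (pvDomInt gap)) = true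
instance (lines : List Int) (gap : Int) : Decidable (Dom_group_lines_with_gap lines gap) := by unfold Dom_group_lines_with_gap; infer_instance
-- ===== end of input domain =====

-- B replaces A's single fold over (groups, start, end) state by repeatedly splitting
-- the sorted list into its longest chainable prefix (span) and emitting (head, last) per chunk.


-- ===== PORT A =====
-- A's loop body: state is (groups, start, end)
def pvStepA (gap : Int) (st : List (Int × Int) × Int × Int) (line : Int) :
    List (Int × Int) × Int × Int :=
  if line ≤ st.2.2 + gap then (st.1, st.2.1, line)
  else (st.1 ++ [(st.2.1, st.2.2)], line, line)

def group_lines_with_gap (lines : List Int) (gap : Int) : List (Int × Int) :=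
  if lines = [] then []
  else
    match PySem.List.sorted lines (fun x => x) false with
    | [] => []
    | x :: xs =>
      let st := xs.foldl (pvStepA gap) ([], x, x)
      st.1 ++ [(st.2.1, st.2.2)]

-- ===== PORT B =====
-- _span: longest prefix of xs chaining onto prev within gap, plus the rest
def pvSpan (gap prev : Int) : List Int → List Int × List Int
  | [] => ([], [])
  | x :: xs =>
      if x > prev + gap then ([], x :: xs)
      else
        let p := pvSpan gap x xs
        (x :: p.1, p.2)

theorem pvSpan_rest_le (gap prev : Int) (xs : List Int) :
    (pvSpan gap prev xs).2.length ≤ xs.length := by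
  induction xs generalizing prev with
  | nil => simp [pvSpan]
  | cons x xs ih =>
      simp only [pvSpan]
      split
      · simp
      · exact le_trans (ih x) (Nat.le_succ _)

-- the while loop of B over the sorted list
def pvGroups (gap : Int) : List Int → List (Int × Int)
  | [] => []
  | x :: xs =>
      let p := pvSpan gap x xs
      (x, p.1.getLastD x) :: pvGroups gap p.2
termination_by xs => xs.length
decreasing_by
  simpa [Nat.lt_succ_iff] using pvSpan_rest_le gap x xs

def group_lines_with_gap_alt (lines : List Int) (gap : Int) : List (Int × Int) :=
  pvGroups gap (PySem.List.sorted lines (fun x => x) false)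

-- ===== PRECONDITION & SPEC =====
def Spec_group_lines_with_gap (lines : List Int) (gap : Int) (out : List (Int × Int)) : Prop := out = group_lines_with_gap_alt lines gap
instance (lines : List Int) (gap : Int) (out : List (Int × Int)) : Decidable (Spec_group_lines_with_gap lines gap out) := by unfold Spec_group_lines_with_gap; infer_instance

-- ===== CLAIM (what is proved, stated in full; the proofs are below) =====
def Claim_equal_group_lines_with_gap : Prop := ∀ (lines : List Int) (gap : Int), Dom_group_lines_with_gap lines gap → Spec_group_lines_with_gap lines gap (group_lines_with_gap lines gap)

-- ===== LEMMAS AND PROOFS =====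

theorem pvGroups_nil (gap : Int) : pvGroups gap [] = [] := by
  simp [pvGroups]

theorem pvGroups_cons (gap x : Int) (xs : List Int) :
    pvGroups gap (x :: xs)
      = (x, (pvSpan gap x xs).1.getLastD x) :: pvGroups gap (pvSpan gap x xs).2 := by
  rw [pvGroups]

-- A's fold, written as front-to-back recursion
def pvLoop (gap start e : Int) : List Int → List (Int × Int)
  | [] => [(start, e)]
  | x :: xs => if x ≤ e + gap then pvLoop gap start x xs
               else (start, e) :: pvLoop gap x x xs

theorem foldl_eq_pvLoop (gap : Int) (xs : List Int) :
    ∀ (groups : List (Int × Int)) (start e : Int),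
      (xs.foldl (pvStepA gap) (groups, start, e)).1
        ++ [((xs.foldl (pvStepA gap) (groups, start, e)).2.1,
             (xs.foldl (pvStepA gap) (groups, start, e)).2.2)]
        = groups ++ pvLoop gap start e xs := by
  induction xs with
  | nil => intro groups start e; simp [pvLoop]
  | cons x xs ih =>
      intro groups start e
      simp only [List.foldl_cons, pvLoop]
      by_cases h : x ≤ e + gap
      · rw [if_pos h]
        show (xs.foldl (pvStepA gap) (pvStepA gap (groups, start, e) x)).1 ++ _ = _
        rw [pvStepA, if_pos h]
        exact ih groups start x
      · rw [if_neg h]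
        show (xs.foldl (pvStepA gap) (pvStepA gap (groups, start, e) x)).1 ++ _ = _
        rw [pvStepA, if_neg h]
        rw [ih (groups ++ [(start, e)]) x x]
        simp

theorem pvLoop_eq_groups (gap : Int) (xs : List Int) :
    ∀ (start e : Int),
      pvLoop gap start e xs
        = (start, (pvSpan gap e xs).1.getLastD e) :: pvGroups gap (pvSpan gap e xs).2 := by
  induction xs with
  | nil => intro start e; simp [pvLoop, pvSpan, pvGroups_nil]
  | cons x xs ih =>
      intro start e
      by_cases h : x ≤ e + gap
      · have h' : ¬ x > e + gap := not_lt.mpr h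
        simp only [pvLoop, if_pos h, pvSpan, if_neg h']
        rw [ih start x, List.getLastD_cons]
      · have h' : x > e + gap := lt_of_not_ge h
        simp only [pvLoop, if_neg h, pvSpan, if_pos h']
        rw [ih x x, ← pvGroups_cons]
        simp

-- ===== VERDICT (by name: the statement is the Claim_ definition above) =====
theorem group_lines_with_gap_spec : Claim_equal_group_lines_with_gap := by
  intro lines gap _
  unfold Spec_group_lines_with_gap group_lines_with_gap group_lines_with_gap_alt
  by_cases hnil : lines = []
  · subst hnil
    simp [PySem.List.sorted, pvGroups_nil]
  · rw [if_neg hnil]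
    have hperm := PySem.List.sorted_perm lines (fun x : Int => x) false
    cases hs : PySem.List.sorted lines (fun x : Int => x) false with
    | nil =>
        rw [hs] at hperm
        exact absurd hperm.symm.eq_nil hnil
    | cons x xs =>
        show (xs.foldl (pvStepA gap) ([], x, x)).1 ++ _ = _
        rw [foldl_eq_pvLoop gap xs [] x x, pvLoop_eq_groups gap xs x x]
        rw [← pvGroups_cons, List.nil_append]
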